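-- pv_equiv track=rewrite | github.com/appropri8/sample-code | 2025/12/24/policy-driven-agent-mesh-enforcing-tool-access-and-data-boundaries-with-pep-pdp-layer/src/tools/read_orders_tool.py | _mask_fields
-- ===== SOURCE A (Python) =====
-- from typing import Dict, Any, List
--
-- def _mask_fields(
--
--     records: List[Dict[str, Any]],
--     fields: List[str]
-- ) -> List[Dict[str, Any]]:
--     """Mask specified fields in records.
--
--     Args:
--         records: List of records
--         fields: List of field names to mask
--
--     Returns:
--         Records with specified fields masked
--     """
--     masked = []
--     for record in records:
--         masked_record = record.copy()
--         for field in fields: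
--             if field in masked_record:
--                 masked_record[field] = "[MASKED]"
--         masked.append(masked_record)
--     return masked
-- ===== SOURCE B (Python) =====
-- def _mask_fields(records, fields):
--     """Mask specified fields in records: one dict comprehension per record,
--     driven by the record's own keys against a set of field names."""
--     field_set = set(fields)
--     return [
--         {k: ("[MASKED]" if k in field_set else v) for k, v in record.items()}
--         for record in records
--     ]
-- ===== Notes on version B (the rewrite author's own statement) =====
-- stated objective: idiomatic
-- what changed: B builds each masked record in one dict comprehension over the record's own items against a set of field names, instead of copying the dict and mutating it in an inner loop over the fields list with a membership test per field.
import Mathlib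
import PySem

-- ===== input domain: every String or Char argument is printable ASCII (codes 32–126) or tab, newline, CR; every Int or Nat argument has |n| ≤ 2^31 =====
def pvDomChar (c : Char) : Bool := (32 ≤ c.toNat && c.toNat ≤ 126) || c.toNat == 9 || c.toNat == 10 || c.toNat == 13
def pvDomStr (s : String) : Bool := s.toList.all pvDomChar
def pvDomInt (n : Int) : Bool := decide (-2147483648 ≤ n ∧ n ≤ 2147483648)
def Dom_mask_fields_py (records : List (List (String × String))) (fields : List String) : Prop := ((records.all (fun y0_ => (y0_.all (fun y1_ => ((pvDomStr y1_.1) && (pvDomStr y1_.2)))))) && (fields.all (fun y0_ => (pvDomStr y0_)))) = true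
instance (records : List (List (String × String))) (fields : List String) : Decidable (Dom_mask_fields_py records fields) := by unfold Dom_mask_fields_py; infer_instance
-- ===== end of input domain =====

-- B rebuilds each record with a single map over its own items against a set of
-- field names (idiomatic decomposition); A copies the dict and mutates it in an
-- inner loop over the fields list.

-- ===== PORT A =====
-- masked = []; for record in records: masked_record = record.copy();
--   for field in fields: if field in masked_record: masked_record[field] = "[MASKED]";
--   masked.append(masked_record)
def mask_fields_py (records : List (List (String × String))) (fields : List String) : List (List (String × String)) :=
  records.foldl
    (fun masked record =>
      masked ++
        [(fields.foldl
            (fun mr field =>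
              if mr.contains field then mr.insert field "[MASKED]" else mr)
            (PySem.Dict.mk record)).items])
    []

-- ===== PORT B =====
-- field_set = set(fields); one dict comprehension over record.items() per record
def mask_fields_py_alt (records : List (List (String × String))) (fields : List String) : List (List (String × String)) :=
  let fieldSet : PySem.Set String := PySem.Set.ofList fields
  records.map (fun record =>
    record.map (fun kv =>
      (kv.1, if PySem.Set.contains fieldSet kv.1 then "[MASKED]" else kv.2)))

-- ===== PRECONDITION & SPEC =====
def Spec_mask_fields_py (records : List (List (String × String))) (fields : List String) (out : List (List (String × String))) : Prop := out = mask_fields_py_alt records fields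
instance (records : List (List (String × String))) (fields : List String) (out : List (List (String × String))) : Decidable (Spec_mask_fields_py records fields out) := by unfold Spec_mask_fields_py; infer_instance

-- ===== CLAIM (what is proved, stated in full; the proofs are below) =====
def Claim_equal_mask_fields_py : Prop := ∀ (records : List (List (String × String))) (fields : List String), Dom_mask_fields_py records fields → Spec_mask_fields_py records fields (mask_fields_py records fields)

-- ===== LEMMAS AND PROOFS =====

-- A's inner loop over `fields` on one record dict produces exactly B's per-item map.
lemma mask_inner_items (fields : List String) (d : PySem.Dict String String) :
    (fields.foldl
        (fun mr field =>
          if mr.contains field then mr.insert field "[MASKED]" else mr) d).items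
      = d.items.map (fun kv => (kv.1, if kv.1 ∈ fields then "[MASKED]" else kv.2)) := by
  induction fields generalizing d with
  | nil => simp
  | cons f fs ih =>
    simp only [List.foldl_cons]
    by_cases hc : d.contains f = true
    · rw [ih, if_pos hc, PySem.Dict.items_insert_of_contains (h := hc), List.map_map]
      refine List.map_congr_left (fun kv _ => ?_)
      by_cases hk : kv.1 = f
      · simp [Function.comp, hk]
      · simp [Function.comp, hk, beq_iff_eq]
    · rw [if_neg (by simp [hc]), ih]
      refine List.map_congr_left (fun kv hkv => ?_)
      have hne : kv.1 ≠ f := by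
        intro h
        have : d.contains f = true := by
          rw [PySem.Dict.contains_iff_mem_keys]
          exact h ▸ PySem.Dict.mem_keys_of_mem_items (d := d) hkv
        exact hc this
      simp [hne]

-- ===== VERDICT (by name: the statement is the Claim_ definition above) =====
theorem mask_fields_py_spec : Claim_equal_mask_fields_py := by
  intro records fields _
  unfold Spec_mask_fields_py mask_fields_py mask_fields_py_alt
  rw [PySem.List.foldl_append_singleton_eq_map]
  refine List.map_congr_left (fun record _ => ?_)
  rw [mask_inner_items]
  refine List.map_congr_left (fun kv _ => ?_)
  simp [PySem.Set.mem_ofList]
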